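-- pv_equiv track=rewrite | github.com/nik20z/ypec_bot | parse/ypec.py | concatenation_numbers
-- ===== SOURCE A (Python) =====
-- def concatenation_numbers(sort_timetable: dict):
--     def check_repetitive_lessons(last_lesson: list, lesson: list):
--         for i in (0, -1):
--             if last_lesson[i][-3:] == lesson[i][-3:]:
--                 return True
--         return False
--
--     new_timetable = {}
--     for last_lesson in sort_timetable.values():
--         numbers = [num for num, lesson in sort_timetable.items() if check_repetitive_lessons(last_lesson, lesson)]
--         repeats = []
--         for num in sorted(numbers):
--             if num.isdigit():
--                 num = int(num)
--                 if str(num + 1) in numbers: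
--                     repeats.append(num)
--                 elif str(num - 1) in numbers:
--                     new_timetable[f"{repeats[0]}-{num}"] = last_lesson
--                     repeats = []
--                 else:
--                     new_timetable[str(num)] = last_lesson
--             else:
--                 new_timetable[num] = last_lesson
--
--     return new_timetable
-- ===== SOURCE B (Python) =====
-- def concatenation_numbers(sort_timetable: dict):
--     # Index the nums once by each lesson-list's first/last 3-char suffixes,
--     # so each row's matching numbers come from two dict lookups instead of a rescan.
--     idx_first = {}
--     idx_last = {}
--     for num, lesson in sort_timetable.items():
--         idx_first.setdefault(lesson[0][-3:], []).append(num)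
--         idx_last.setdefault(lesson[-1][-3:], []).append(num)
--
--     new_timetable = {}
--     for last_lesson in sort_timetable.values():
--         numbers = list(dict.fromkeys(
--             idx_first.get(last_lesson[0][-3:], [])
--             + idx_last.get(last_lesson[-1][-3:], [])))
--         repeats = []
--         for num in sorted(numbers):
--             if num.isdigit():
--                 num = int(num)
--                 if str(num + 1) in numbers:
--                     repeats.append(num)
--                 elif str(num - 1) in numbers:
--                     new_timetable[f"{repeats[0]}-{num}"] = last_lesson
--                     repeats = []
--                 else:
--                     new_timetable[str(num)] = last_lesson
--             else:
--                 new_timetable[num] = last_lesson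
--
--     return new_timetable
-- ===== Notes on version B (the rewrite author's own statement) =====
-- stated objective: faster
-- what changed: B builds, in one pass, two dicts indexing the nums by their lesson's first/last 3-char suffix, so each row's matching numbers come from two dict lookups plus an ordered dedup instead of rescanning every item; the range-collapsing loop over sorted(numbers) is unchanged.
import Mathlib
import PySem

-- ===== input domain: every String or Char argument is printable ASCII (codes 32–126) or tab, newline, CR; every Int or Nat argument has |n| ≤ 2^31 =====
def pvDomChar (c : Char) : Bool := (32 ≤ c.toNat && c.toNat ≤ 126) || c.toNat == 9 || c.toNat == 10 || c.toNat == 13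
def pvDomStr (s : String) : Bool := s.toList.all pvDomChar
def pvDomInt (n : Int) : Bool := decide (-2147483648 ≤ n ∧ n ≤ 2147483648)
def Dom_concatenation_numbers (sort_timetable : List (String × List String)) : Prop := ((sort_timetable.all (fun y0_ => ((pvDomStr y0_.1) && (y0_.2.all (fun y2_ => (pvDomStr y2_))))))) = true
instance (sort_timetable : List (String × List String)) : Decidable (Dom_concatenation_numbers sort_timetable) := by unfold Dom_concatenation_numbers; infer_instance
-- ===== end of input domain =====

-- B indexes the nums once by each lesson's first/last 3-char suffix (two dict lookups per row
-- instead of rescanning all items); the range-collapsing loop is unchanged. Objective: faster.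


-- shared helpers (both Pythons contain these expressions verbatim)
-- lesson[i][-3:], with a default for the out-of-range case that Pre_ excludes
def pvSfx (lesson : List String) (i : Int) : String :=
  PySem.Str.slice (PySem.List.pyGetD lesson i "") (some (-3)) none

-- A's check_repetitive_lessons: the (0, -1) loop of two suffix comparisons
def pvMatch (last_lesson lesson : List String) : Bool :=
  (pvSfx last_lesson 0 == pvSfx lesson 0) || (pvSfx last_lesson (-1) == pvSfx lesson (-1))

-- f"{repeats[0]}-{num}"
def pvFmtRange (r n : Int) : String :=
  PySem.Str.join "-" [PySem.Int.toStr r, PySem.Int.toStr n]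

-- the 'for num in sorted(numbers)' range-collapsing loop, identical in A and B;
-- repeats[0] raises IndexError in Python when nothing was accumulated (excluded by Pre_), headD 0 here
def pvCollapse (last_lesson : List String) (numbers : List String) :
    List String → List Int → PySem.Dict String (List String) → PySem.Dict String (List String)
  | [], _, d => d
  | num :: rest, repeats, d =>
    if PySem.Str.strIsdigit num then
      let n : Int := (PySem.Int.ofStr? num).getD 0
      if numbers.contains (PySem.Int.toStr (n + 1)) then
        pvCollapse last_lesson numbers rest (repeats ++ [n]) d
      else if numbers.contains (PySem.Int.toStr (n - 1)) then
        pvCollapse last_lesson numbers rest [] (d.insert (pvFmtRange (repeats.headD 0) n) last_lesson)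
      else
        pvCollapse last_lesson numbers rest repeats (d.insert (PySem.Int.toStr n) last_lesson)
    else
      pvCollapse last_lesson numbers rest repeats (d.insert num last_lesson)

-- ===== PORT A =====
def concatenation_numbers (sort_timetable : List (String × List String)) : List (String × List String) :=
  ((sort_timetable.map Prod.snd).foldl
    (fun d last_lesson =>
      let numbers := (sort_timetable.filter (fun p => pvMatch last_lesson p.2)).map Prod.fst
      pvCollapse last_lesson numbers (PySem.List.sorted numbers (fun x => x) false) [] d)
    PySem.Dict.empty).items

-- ===== PORT B =====
-- idx.setdefault(lesson[i][-3:], []).append(num), one pass over the items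
def pvIndexBy (sort_timetable : List (String × List String)) (i : Int) : PySem.Dict String (List String) :=
  sort_timetable.foldl
    (fun d p => d.insert (pvSfx p.2 i) (d.getD (pvSfx p.2 i) [] ++ [p.1]))
    PySem.Dict.empty

def concatenation_numbers_alt (sort_timetable : List (String × List String)) : List (String × List String) :=
  let idxF := pvIndexBy sort_timetable 0
  let idxL := pvIndexBy sort_timetable (-1)
  ((sort_timetable.map Prod.snd).foldl
    (fun d last_lesson =>
      let numbers := PySem.List.dedup
        (idxF.getD (pvSfx last_lesson 0) [] ++ idxL.getD (pvSfx last_lesson (-1)) [])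
      pvCollapse last_lesson numbers (PySem.List.sorted numbers (fun x => x) false) [] d)
    PySem.Dict.empty).items

-- ===== PRECONDITION & SPEC =====
-- the numbers matched against a row, as a set of keys (membership conditions only)
def pvNumbersOf (sort_timetable : List (String × List String)) (last_lesson : List String) : List String :=
  (sort_timetable.filter (fun p => pvMatch last_lesson p.2)).map Prod.fst

def pvCloser (N : List String) (n : String) : Bool :=
  PySem.Str.strIsdigit n
    && !(N.contains (PySem.Int.toStr ((PySem.Int.ofStr? n).getD 0 + 1)))
    && N.contains (PySem.Int.toStr ((PySem.Int.ofStr? n).getD 0 - 1))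

def pvAppender (N : List String) (m : String) : Bool :=
  PySem.Str.strIsdigit m && N.contains (PySem.Int.toStr ((PySem.Int.ofStr? m).getD 0 + 1))

-- the lexicographic scan never closes a range before an opener was accumulated
def pvNoCrash (N : List String) : Bool :=
  N.all (fun n => !(pvCloser N n)
    || N.any (fun m => pvAppender N m && PySem.Chars.strLt m.toList n.toList
          && !(N.any (fun k => pvCloser N k && PySem.Chars.strLt m.toList k.toList
                  && PySem.Chars.strLt k.toList n.toList))))

-- Pre_ excludes exactly the inputs on which Python A raises IndexError: a row whose lesson
-- list has no element (last_lesson[0] raises), or a row whose lexicographically sorted numbers reach the `repeats[0]`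
-- range-closing `repeats[0]` branch before any opener was accumulated; duplicate keys cannot come from a Python dict.
def Pre_concatenation_numbers (sort_timetable : List (String × List String)) : Prop :=
  (sort_timetable.map Prod.fst).Nodup
  ∧ (∀ p ∈ sort_timetable, p.2 ≠ [])
  ∧ (∀ p ∈ sort_timetable, pvNoCrash (pvNumbersOf sort_timetable p.2) = true)
instance (sort_timetable : List (String × List String)) : Decidable (Pre_concatenation_numbers sort_timetable) := by unfold Pre_concatenation_numbers; infer_instance

def pvWitness_concatenation_numbers : (List (String × List String)) :=
  [("1", ["math"]), ("2", ["math"]), ("lunch", ["rest"])]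

def Spec_concatenation_numbers (sort_timetable : List (String × List String)) (out : List (String × List String)) : Prop := out = concatenation_numbers_alt sort_timetable
instance (sort_timetable : List (String × List String)) (out : List (String × List String)) : Decidable (Spec_concatenation_numbers sort_timetable out) := by unfold Spec_concatenation_numbers; infer_instance

-- ===== CLAIM (what is proved, stated in full; the proofs are below) =====
def Claim_equal_concatenation_numbers : Prop := ∀ (sort_timetable : List (String × List String)), Dom_concatenation_numbers sort_timetable → Pre_concatenation_numbers sort_timetable → Spec_concatenation_numbers sort_timetable (concatenation_numbers sort_timetable)

-- ===== LEMMAS AND PROOFS =====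

-- the one-pass index: looked up at s, it is the keys whose i-suffix is s, in order
theorem pvIndex_getD (st : List (String × List String)) (i : Int)
    (d : PySem.Dict String (List String)) (s : String) :
    (st.foldl (fun d p => d.insert (pvSfx p.2 i) (d.getD (pvSfx p.2 i) [] ++ [p.1])) d).getD s []
      = d.getD s [] ++ (st.filter (fun p => pvSfx p.2 i == s)).map Prod.fst := by
  induction st generalizing d with
  | nil => simp
  | cons p rest ih =>
    simp only [List.foldl_cons, ih, List.filter_cons]
    rw [PySem.Dict.getD_insert]
    by_cases h : pvSfx p.2 i = s
    · simp [h]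
    · have : (pvSfx p.2 i == s) = false := by simp [h]
      simp only [this, Bool.false_eq_true, if_false]
      rw [if_neg (fun h' => h h'.symm)]

theorem pvIndexBy_getD (st : List (String × List String)) (i : Int) (s : String) :
    (pvIndexBy st i).getD s [] = (st.filter (fun p => pvSfx p.2 i == s)).map Prod.fst := by
  have h := pvIndex_getD st i PySem.Dict.empty s
  simpa [pvIndexBy] using h

-- membership in B's deduplicated union = membership in A's filtered comprehension
theorem pvNumbers_mem (st : List (String × List String)) (L : List String) (x : String) :
    (x ∈ PySem.List.dedup
        ((pvIndexBy st 0).getD (pvSfx L 0) [] ++ (pvIndexBy st (-1)).getD (pvSfx L (-1)) []))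
      ↔ x ∈ pvNumbersOf st L := by
  rw [pvIndexBy_getD, pvIndexBy_getD]
  simp only [PySem.List.mem_dedup, List.mem_append, pvNumbersOf, List.mem_map, List.mem_filter,
    pvMatch, Bool.or_eq_true, beq_iff_eq]
  constructor
  · rintro (⟨p, ⟨hp, hs⟩, hx⟩ | ⟨p, ⟨hp, hs⟩, hx⟩)
    · exact ⟨p, ⟨hp, Or.inl hs.symm⟩, hx⟩
    · exact ⟨p, ⟨hp, Or.inr hs.symm⟩, hx⟩
  · rintro ⟨p, ⟨hp, hs | hs⟩, hx⟩
    · exact Or.inl ⟨p, ⟨hp, hs.symm⟩, hx⟩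
    · exact Or.inr ⟨p, ⟨hp, hs.symm⟩, hx⟩

-- the collapse loop reads `numbers` only through membership
theorem pvCollapse_congr (L : List String) (ns ns' : List String)
    (h : ∀ x : String, x ∈ ns ↔ x ∈ ns') :
    ∀ (l : List String) (r : List Int) (d : PySem.Dict String (List String)),
      pvCollapse L ns l r d = pvCollapse L ns' l r d := by
  intro l
  induction l with
  | nil => intro r d; rfl
  | cons num rest ih =>
    intro r d
    have hc : ∀ y : String, ns.contains y = ns'.contains y := by
      intro y
      by_cases hy : y ∈ ns
      · simp [hy, (h y).mp hy]
      · simp [hy]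
        exact fun hy' => hy ((h y).mpr hy')
    simp only [pvCollapse, hc]
    split
    · split
      · exact ih _ _
      · split
        · exact ih _ _
        · exact ih _ _
    · exact ih _ _

-- A's numbers list has no duplicates when the dict keys are distinct
theorem pvNumbersOf_nodup (st : List (String × List String)) (L : List String)
    (h : (st.map Prod.fst).Nodup) : (pvNumbersOf st L).Nodup := by
  unfold pvNumbersOf
  have hsub : ((st.filter (fun p => pvMatch L p.2)).map Prod.fst).Sublist (st.map Prod.fst) :=
    List.Sublist.map Prod.fst List.filter_sublist
  exact h.sublist hsub

theorem concatenation_numbers_spec_aux (st : List (String × List String))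
    (hnd : (st.map Prod.fst).Nodup) :
    concatenation_numbers st = concatenation_numbers_alt st := by
  unfold concatenation_numbers concatenation_numbers_alt
  congr 1
  apply List.foldl_ext
  intro d L _
  simp only
  set nsA := pvNumbersOf st L with hA
  set nsB := PySem.List.dedup
    ((pvIndexBy st 0).getD (pvSfx L 0) [] ++ (pvIndexBy st (-1)).getD (pvSfx L (-1)) []) with hB
  have hmem : ∀ x : String, x ∈ nsB ↔ x ∈ nsA := fun x => pvNumbers_mem st L x
  have hndA : nsA.Nodup := pvNumbersOf_nodup st L hnd
  have hndB : nsB.Nodup := PySem.List.nodup_dedup _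
  have hperm : nsA.Perm nsB :=
    (List.perm_ext_iff_of_nodup hndA hndB).mpr (fun x => (hmem x).symm)
  have hsorted : PySem.List.sorted nsA (fun x => x) false = PySem.List.sorted nsB (fun x => x) false :=
    PySem.List.sorted_eq_sorted_of_perm nsA nsB (fun x => x) (fun _ _ h => h) hperm
  rw [← hsorted]
  exact (pvCollapse_congr L nsA nsB (fun x => (hmem x).symm) _ [] d).symm ▸
    (pvCollapse_congr L nsA nsB (fun x => (hmem x).symm) _ [] d) ▸ rfl

-- ===== VERDICT (by name: the statement is the Claim_ definition above) =====
theorem concatenation_numbers_spec : Claim_equal_concatenation_numbers := by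
  intro st _ hpre
  unfold Spec_concatenation_numbers
  exact concatenation_numbers_spec_aux st hpre.1
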